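/-
  GENERATED by c/gen_frames.py from c/FRAMES.txt — do not edit; re-run the script when the image is rebuilt.

  The 9 protected frames of the image (functions with address-taken locals), as `Asan.FrameLayout`s, each with the
  proof `…_ok : ….OK` (by evaluation) that the two lemmas of Asan/Stack.lean ask for. For a frame F of a function entered with
  rsp = RA (pointing at the return address): base = RA − F.raOff; the prologue's stores are `storesMem mem (base / 8) F.prologue`,
  the epilogue's `storesMem mem (base / 8) F.epilogue`. The comment on each store is the address of the instruction.
-/
import Asan.Stack
namespace Vorbis.Frames
open Asan

/-- `decode_all` (0x1034a0): base = [rsp+0x30] = RA − 184, 128 bytes. Description string: "4 32 4 8 error:63 48 4 5 ch:85 64 8 7 chan:84 96 16 4 a:56". -/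
def decode_all : FrameLayout where
  name := "decode_all"
  fn := 0x1034a0
  descr := 0x120fc0
  raOff := 184
  size := 128
  objs := [
    ⟨"error", 32, 4⟩,
    ⟨"ch", 48, 4⟩,
    ⟨"chan", 64, 8⟩,
    ⟨"a", 96, 16⟩]
  prologue := [
    ⟨0, 4, 0xf1f1f1f1⟩  /- 0x1034de -/,
    ⟨4, 4, 0xf204f204⟩  /- 0x1034e9 -/,
    ⟨8, 4, 0xf2f2f200⟩  /- 0x1034f4 -/,
    ⟨12, 4, 0xf3f30000⟩  /- 0x1034ff -/]
  epilogue := [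
    ⟨0, 8, 0⟩  /- 0x10351d -/,
    ⟨8, 8, 0⟩  /- 0x103528 -/]
  poison := [
    (0, 0xf1), (1, 0xf1), (2, 0xf1), (3, 0xf1), (4, 0x4), (5, 0xf2), (6, 0x4), (7, 0xf2),
    (9, 0xf2), (10, 0xf2), (11, 0xf2), (14, 0xf3), (15, 0xf3)]

set_option maxRecDepth 100000 in
/-- The layout of `decode_all` satisfies what the prologue / epilogue lemmas need. -/
theorem decode_all_ok : decode_all.OK := by decide

/-- `compute_codewords` (0x1081a0): base = [rsp+0x30] = RA − 248, 192 bytes. Description string: "1 32 128 14 available:1116". -/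
def compute_codewords : FrameLayout where
  name := "compute_codewords"
  fn := 0x1081a0
  descr := 0x120b00
  raOff := 248
  size := 192
  objs := [
    ⟨"available", 32, 128⟩]
  prologue := [
    ⟨0, 4, 0xf1f1f1f1⟩  /- 0x1081f0 -/,
    ⟨20, 4, 0xf3f3f3f3⟩  /- 0x1081fa -/]
  epilogue := [
    ⟨0, 4, 0⟩  /- 0x1083b3 -/,
    ⟨20, 4, 0⟩  /- 0x1083be -/]
  poison := [
    (0, 0xf1), (1, 0xf1), (2, 0xf1), (3, 0xf1), (20, 0xf3), (21, 0xf3), (22, 0xf3), (23, 0xf3)]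

set_option maxRecDepth 100000 in
/-- The layout of `compute_codewords` satisfies what the prologue / epilogue lemmas need. -/
theorem compute_codewords_ok : compute_codewords.OK := by decide

/-- `decode_residue` (0x10ec00): base = [rbp-0x90] = RA − 152, 96 bytes. Description string: "2 48 4 12 c_inter:2214 64 4 12 p_inter:2214". -/
def decode_residue : FrameLayout where
  name := "decode_residue"
  fn := 0x10ec00
  descr := 0x120b60
  raOff := 152
  size := 96
  objs := [
    ⟨"c_inter", 48, 4⟩,
    ⟨"p_inter", 64, 4⟩]
  prologue := [
    ⟨0, 4, 0xf1f1f1f1⟩  /- 0x10ec6b -/,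
    ⟨4, 4, 0xf204f1f1⟩  /- 0x10ec75 -/,
    ⟨8, 4, 0xf3f3f304⟩  /- 0x10ec7f -/]
  epilogue := [
    ⟨0, 8, 0⟩  /- 0x10fa69 -/,
    ⟨8, 4, 0⟩  /- 0x10fa74 -/]
  poison := [
    (0, 0xf1), (1, 0xf1), (2, 0xf1), (3, 0xf1), (4, 0xf1), (5, 0xf1), (6, 0x4), (7, 0xf2),
    (8, 0x4), (9, 0xf3), (10, 0xf3), (11, 0xf3)]

set_option maxRecDepth 100000 in
/-- The layout of `decode_residue` satisfies what the prologue / epilogue lemmas need. -/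
theorem decode_residue_ok : decode_residue.OK := by decide

/-- `vorbis_decode_packet_rest` (0x110b00): base = [rsp+0x80] = RA − 2872, 2816 bytes. Description string: "4 32 128 20 residue_buffers:3332 192 256 18 do_not_decode:3334 512 1024 17 zero_channel:3211 1664 1024 24 really_zero_channel:3212". -/
def vorbis_decode_packet_rest : FrameLayout where
  name := "vorbis_decode_packet_rest"
  fn := 0x110b00
  descr := 0x120be0
  raOff := 2872
  size := 2816
  objs := [
    ⟨"residue_buffers", 32, 128⟩,
    ⟨"do_not_decode", 192, 256⟩,
    ⟨"zero_channel", 512, 1024⟩,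
    ⟨"really_zero_channel", 1664, 1024⟩]
  prologue := [
    ⟨0, 4, 0xf1f1f1f1⟩  /- 0x110b62 -/,
    ⟨20, 4, 0xf2f2f2f2⟩  /- 0x110b6c -/,
    ⟨56, 4, 0xf2f2f2f2⟩  /- 0x110b76 -/,
    ⟨60, 4, 0xf2f2f2f2⟩  /- 0x110b80 -/,
    ⟨192, 4, 0xf2f2f2f2⟩  /- 0x110b8a -/,
    ⟨196, 4, 0xf2f2f2f2⟩  /- 0x110b94 -/,
    ⟨200, 4, 0xf2f2f2f2⟩  /- 0x110b9e -/,
    ⟨204, 4, 0xf2f2f2f2⟩  /- 0x110ba8 -/,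
    ⟨336, 4, 0xf3f3f3f3⟩  /- 0x110bb2 -/,
    ⟨340, 4, 0xf3f3f3f3⟩  /- 0x110bbc -/,
    ⟨344, 4, 0xf3f3f3f3⟩  /- 0x110bc6 -/,
    ⟨348, 4, 0xf3f3f3f3⟩  /- 0x110bd0 -/]
  epilogue := [
    ⟨0, 4, 0⟩  /- 0x111a3e -/,
    ⟨20, 4, 0⟩  /- 0x111a49 -/,
    ⟨56, 8, 0⟩  /- 0x111a54 -/,
    ⟨192, 8, 0⟩  /- 0x111a5f -/,
    ⟨200, 8, 0⟩  /- 0x111a6a -/,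
    ⟨336, 8, 0⟩  /- 0x111a75 -/,
    ⟨344, 8, 0⟩  /- 0x111a80 -/]
  poison := [
    (0, 0xf1), (1, 0xf1), (2, 0xf1), (3, 0xf1), (20, 0xf2), (21, 0xf2), (22, 0xf2), (23, 0xf2),
    (56, 0xf2), (57, 0xf2), (58, 0xf2), (59, 0xf2), (60, 0xf2), (61, 0xf2), (62, 0xf2), (63, 0xf2),
    (192, 0xf2), (193, 0xf2), (194, 0xf2), (195, 0xf2), (196, 0xf2), (197, 0xf2), (198, 0xf2), (199, 0xf2),
    (200, 0xf2), (201, 0xf2), (202, 0xf2), (203, 0xf2), (204, 0xf2), (205, 0xf2), (206, 0xf2), (207, 0xf2),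
    (336, 0xf3), (337, 0xf3), (338, 0xf3), (339, 0xf3), (340, 0xf3), (341, 0xf3), (342, 0xf3), (343, 0xf3),
    (344, 0xf3), (345, 0xf3), (346, 0xf3), (347, 0xf3), (348, 0xf3), (349, 0xf3), (350, 0xf3), (351, 0xf3)]

set_option maxRecDepth 100000 in
/-- The layout of `vorbis_decode_packet_rest` satisfies what the prologue / epilogue lemmas need. -/
theorem vorbis_decode_packet_rest_ok : vorbis_decode_packet_rest.OK := by decide

/-- `vorbis_decode_packet` (0x113660): base = [rsp+0x10] = RA − 152, 96 bytes. Description string: "3 32 4 9 mode:3478 48 4 13 left_end:3478 64 4 14 right_end:3478". -/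
def vorbis_decode_packet : FrameLayout where
  name := "vorbis_decode_packet"
  fn := 0x113660
  descr := 0x120d00
  raOff := 152
  size := 96
  objs := [
    ⟨"mode", 32, 4⟩,
    ⟨"left_end", 48, 4⟩,
    ⟨"right_end", 64, 4⟩]
  prologue := [
    ⟨0, 4, 0xf1f1f1f1⟩  /- 0x1136a0 -/,
    ⟨4, 4, 0xf204f204⟩  /- 0x1136aa -/,
    ⟨8, 4, 0xf3f3f304⟩  /- 0x1136b4 -/]
  epilogue := [
    ⟨0, 8, 0⟩  /- 0x1136d9 -/,
    ⟨8, 4, 0⟩  /- 0x1136e4 -/]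
  poison := [
    (0, 0xf1), (1, 0xf1), (2, 0xf1), (3, 0xf1), (4, 0x4), (5, 0xf2), (6, 0x4), (7, 0xf2),
    (8, 0x4), (9, 0xf3), (10, 0xf3), (11, 0xf3)]

set_option maxRecDepth 100000 in
/-- The layout of `vorbis_decode_packet` satisfies what the prologue / epilogue lemmas need. -/
theorem vorbis_decode_packet_ok : vorbis_decode_packet.OK := by decide

/-- `vorbis_pump_first_frame` (0x113840): base = [rsp+0x0] = RA − 120, 96 bytes. Description string: "3 32 4 8 len:3538 48 4 10 right:3538 64 4 9 left:3538". -/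
def vorbis_pump_first_frame : FrameLayout where
  name := "vorbis_pump_first_frame"
  fn := 0x113840
  descr := 0x120d80
  raOff := 120
  size := 96
  objs := [
    ⟨"len", 32, 4⟩,
    ⟨"right", 48, 4⟩,
    ⟨"left", 64, 4⟩]
  prologue := [
    ⟨0, 4, 0xf1f1f1f1⟩  /- 0x11386c -/,
    ⟨4, 4, 0xf204f204⟩  /- 0x113876 -/,
    ⟨8, 4, 0xf3f3f304⟩  /- 0x113880 -/]
  epilogue := [
    ⟨0, 8, 0⟩  /- 0x1138a4 -/,
    ⟨8, 4, 0⟩  /- 0x1138af -/]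
  poison := [
    (0, 0xf1), (1, 0xf1), (2, 0xf1), (3, 0xf1), (4, 0x4), (5, 0xf2), (6, 0x4), (7, 0xf2),
    (8, 0x4), (9, 0xf3), (10, 0xf3), (11, 0xf3)]

set_option maxRecDepth 100000 in
/-- The layout of `vorbis_pump_first_frame` satisfies what the prologue / epilogue lemmas need. -/
theorem vorbis_pump_first_frame_ok : vorbis_pump_first_frame.OK := by decide

/-- `start_decoder` (0x113980): base = [rsp+0x50] = RA − 1400, 1344 bytes. Description string: "5 48 4 8 low:4027 64 4 7 hi:4027 80 6 11 header:3609 112 64 20 residue_cascade:4044 208 1000 6 p:3981". -/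
def start_decoder : FrameLayout where
  name := "start_decoder"
  fn := 0x113980
  descr := 0x120e00
  raOff := 1400
  size := 1344
  objs := [
    ⟨"low", 48, 4⟩,
    ⟨"hi", 64, 4⟩,
    ⟨"header", 80, 6⟩,
    ⟨"residue_cascade", 112, 64⟩,
    ⟨"p", 208, 1000⟩]
  prologue := [
    ⟨0, 4, 0xf1f1f1f1⟩  /- 0x1139bd -/,
    ⟨4, 4, 0xf204f1f1⟩  /- 0x1139c7 -/,
    ⟨8, 4, 0xf206f204⟩  /- 0x1139d1 -/,
    ⟨12, 4, 0xf2f2⟩  /- 0x1139db -/,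
    ⟨20, 4, 0xf2f20000⟩  /- 0x1139e5 -/,
    ⟨24, 4, 0xf2f2⟩  /- 0x1139ef -/,
    ⟨148, 4, 0xf3000000⟩  /- 0x1139f9 -/,
    ⟨152, 4, 0xf3f3f3f3⟩  /- 0x113a03 -/,
    ⟨156, 4, 0xf3f3f3f3⟩  /- 0x113a0d -/,
    ⟨160, 4, 0xf3f3f3f3⟩  /- 0x113a17 -/,
    ⟨164, 4, 0xf3f3f3f3⟩  /- 0x113a21 -/]
  epilogue := [
    ⟨0, 8, 0⟩  /- 0x113b27 -/,
    ⟨8, 8, 0⟩  /- 0x113b32 -/,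
    ⟨20, 8, 0⟩  /- 0x113b3d -/,
    ⟨148, 8, 0⟩  /- 0x113b48 -/,
    ⟨156, 8, 0⟩  /- 0x113b53 -/,
    ⟨164, 4, 0⟩  /- 0x113b5e -/]
  poison := [
    (0, 0xf1), (1, 0xf1), (2, 0xf1), (3, 0xf1), (4, 0xf1), (5, 0xf1), (6, 0x4), (7, 0xf2),
    (8, 0x4), (9, 0xf2), (10, 0x6), (11, 0xf2), (12, 0xf2), (13, 0xf2), (22, 0xf2), (23, 0xf2),
    (24, 0xf2), (25, 0xf2), (151, 0xf3), (152, 0xf3), (153, 0xf3), (154, 0xf3), (155, 0xf3), (156, 0xf3),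
    (157, 0xf3), (158, 0xf3), (159, 0xf3), (160, 0xf3), (161, 0xf3), (162, 0xf3), (163, 0xf3), (164, 0xf3),
    (165, 0xf3), (166, 0xf3), (167, 0xf3)]

set_option maxRecDepth 100000 in
/-- The layout of `start_decoder` satisfies what the prologue / epilogue lemmas need. -/
theorem start_decoder_ok : start_decoder.OK := by decide

/-- `stb_vorbis_get_frame_float` (0x1196c0): base = [rsp+0x20] = RA − 152, 96 bytes. Description string: "3 32 4 8 len:5057 48 4 10 right:5057 64 4 9 left:5057". -/
def stb_vorbis_get_frame_float : FrameLayout where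
  name := "stb_vorbis_get_frame_float"
  fn := 0x1196c0
  descr := 0x120ee0
  raOff := 152
  size := 96
  objs := [
    ⟨"len", 32, 4⟩,
    ⟨"right", 48, 4⟩,
    ⟨"left", 64, 4⟩]
  prologue := [
    ⟨0, 4, 0xf1f1f1f1⟩  /- 0x119702 -/,
    ⟨4, 4, 0xf204f204⟩  /- 0x11970d -/,
    ⟨8, 4, 0xf3f3f304⟩  /- 0x119718 -/]
  epilogue := [
    ⟨0, 8, 0⟩  /- 0x119769 -/,
    ⟨8, 4, 0⟩  /- 0x119774 -/]
  poison := [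
    (0, 0xf1), (1, 0xf1), (2, 0xf1), (3, 0xf1), (4, 0x4), (5, 0xf2), (6, 0x4), (7, 0xf2),
    (8, 0x4), (9, 0xf3), (10, 0xf3), (11, 0xf3)]

set_option maxRecDepth 100000 in
/-- The layout of `stb_vorbis_get_frame_float` satisfies what the prologue / epilogue lemmas need. -/
theorem stb_vorbis_get_frame_float_ok : stb_vorbis_get_frame_float.OK := by decide

/-- `stb_vorbis_open_memory` (0x119a40): base = [rsp+0x0] = RA − 2024, 1984 bytes. Description string: "1 48 1808 6 p:5128". -/
def stb_vorbis_open_memory : FrameLayout where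
  name := "stb_vorbis_open_memory"
  fn := 0x119a40
  descr := 0x120f60
  raOff := 2024
  size := 1984
  objs := [
    ⟨"p", 48, 1808⟩]
  prologue := [
    ⟨0, 4, 0xf1f1f1f1⟩  /- 0x119a74 -/,
    ⟨4, 4, 0xf1f1⟩  /- 0x119a7e -/,
    ⟨232, 4, 0xf3f3f3f3⟩  /- 0x119a88 -/,
    ⟨236, 4, 0xf3f3f3f3⟩  /- 0x119a92 -/,
    ⟨240, 4, 0xf3f3f3f3⟩  /- 0x119a9c -/,
    ⟨244, 4, 0xf3f3f3f3⟩  /- 0x119aa6 -/]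
  epilogue := [
    ⟨0, 8, 0⟩  /- 0x119bb9 -/,
    ⟨232, 8, 0⟩  /- 0x119bc4 -/,
    ⟨240, 8, 0⟩  /- 0x119bcf -/]
  poison := [
    (0, 0xf1), (1, 0xf1), (2, 0xf1), (3, 0xf1), (4, 0xf1), (5, 0xf1), (232, 0xf3), (233, 0xf3),
    (234, 0xf3), (235, 0xf3), (236, 0xf3), (237, 0xf3), (238, 0xf3), (239, 0xf3), (240, 0xf3), (241, 0xf3),
    (242, 0xf3), (243, 0xf3), (244, 0xf3), (245, 0xf3), (246, 0xf3), (247, 0xf3)]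

set_option maxRecDepth 100000 in
/-- The layout of `stb_vorbis_open_memory` satisfies what the prologue / epilogue lemmas need. -/
theorem stb_vorbis_open_memory_ok : stb_vorbis_open_memory.OK := by decide

/-- The protected frames of the image. -/
def all : List FrameLayout := [decode_all, compute_codewords, decode_residue, vorbis_decode_packet_rest, vorbis_decode_packet, vorbis_pump_first_frame, start_decoder, stb_vorbis_get_frame_float, stb_vorbis_open_memory]

/-- Every protected frame of the image is well formed. -/
theorem all_ok : ∀ F, F ∈ all → F.OK := by
  intro F hF
  simp only [all, List.mem_cons, List.not_mem_nil, or_false] at hF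
  rcases hF with rfl | rfl | rfl | rfl | rfl | rfl | rfl | rfl | rfl
  · exact decode_all_ok
  · exact compute_codewords_ok
  · exact decode_residue_ok
  · exact vorbis_decode_packet_rest_ok
  · exact vorbis_decode_packet_ok
  · exact vorbis_pump_first_frame_ok
  · exact start_decoder_ok
  · exact stb_vorbis_get_frame_float_ok
  · exact stb_vorbis_open_memory_ok

end Vorbis.Frames
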